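-- pv_equiv track=rewrite | github.com/Nicokac/portafolio-iol | apps/operaciones_iol/selectors.py | normalize_operation_filters
-- ===== SOURCE A (Python) =====
-- def normalize_operation_filters(params) -> dict:
--     params = params or {}
--
--     def pick(*keys):
--         getter = getattr(params, 'get', None)
--         for key in keys:
--             value = getter(key) if callable(getter) else params.get(key)
--             if value not in (None, ''):
--                 return str(value).strip()
--         return ''
--
--     normalized = {
--         'numero': pick('numero', 'filtro.numero'),
--         'estado': pick('estado', 'filtro.estado') or 'todas',
--         'fecha_desde': pick('fecha_desde', 'fechaDesde', 'filtro.fechaDesde'),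
--         'fecha_hasta': pick('fecha_hasta', 'fechaHasta', 'filtro.fechaHasta'),
--         'pais': pick('pais', 'filtro.pais') or 'argentina',
--     }
--     if normalized['estado'] not in {'todas', 'terminada', 'iniciada', 'pendiente', 'cancelada', 'rechazada'}:
--         normalized['estado'] = 'todas'
--     if normalized['pais'] not in {'argentina', 'estados_Unidos'}:
--         normalized['pais'] = 'argentina'
--     return normalized
-- ===== SOURCE B (Python) =====
-- def normalize_operation_filters(params) -> dict:
--     params = params or {}
--
--     ALIASES = {
--         'numero': ('numero', 0), 'filtro.numero': ('numero', 1),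
--         'estado': ('estado', 0), 'filtro.estado': ('estado', 1),
--         'fecha_desde': ('fecha_desde', 0), 'fechaDesde': ('fecha_desde', 1),
--         'filtro.fechaDesde': ('fecha_desde', 2),
--         'fecha_hasta': ('fecha_hasta', 0), 'fechaHasta': ('fecha_hasta', 1),
--         'filtro.fechaHasta': ('fecha_hasta', 2),
--         'pais': ('pais', 0), 'filtro.pais': ('pais', 1),
--     }
--     best = {}
--     for key, value in params.items():
--         spec = ALIASES.get(key)
--         if spec is None or value in (None, ''):
--             continue
--         field, rank = spec
--         if field not in best or rank < best[field][0]: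
--             best[field] = (rank, str(value).strip())
--
--     ALLOWED = {
--         'estado': (('todas', 'terminada', 'iniciada', 'pendiente', 'cancelada', 'rechazada'), 'todas'),
--         'pais': (('argentina', 'estados_Unidos'), 'argentina'),
--     }
--     result = {}
--     for field in ('numero', 'estado', 'fecha_desde', 'fecha_hasta', 'pais'):
--         value = best[field][1] if field in best else ''
--         rule = ALLOWED.get(field)
--         if rule is not None and value not in rule[0]:
--             value = rule[1]
--         result[field] = value
--     return result
-- ===== Notes on version B (the rewrite author's own statement) =====
-- stated objective: alternative
-- what changed: Instead of probing candidate keys per output field like A, B makes a single pass over the input items, mapping each incoming key through an alias table to a canonical field and keeping the lowest-rank non-empty value per field, then emits the five fields with a validation/default pass.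
import Mathlib
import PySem

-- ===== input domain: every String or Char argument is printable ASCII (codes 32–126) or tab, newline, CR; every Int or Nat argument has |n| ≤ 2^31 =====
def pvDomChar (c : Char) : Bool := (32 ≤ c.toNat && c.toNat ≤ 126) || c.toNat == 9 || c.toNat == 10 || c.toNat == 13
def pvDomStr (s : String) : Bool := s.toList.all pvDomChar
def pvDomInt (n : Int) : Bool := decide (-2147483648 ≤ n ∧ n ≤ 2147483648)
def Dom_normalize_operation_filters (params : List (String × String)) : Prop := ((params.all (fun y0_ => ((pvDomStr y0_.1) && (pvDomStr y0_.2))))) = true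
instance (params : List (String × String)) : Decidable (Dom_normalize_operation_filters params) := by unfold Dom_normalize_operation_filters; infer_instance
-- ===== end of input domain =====

-- B replaces A's per-field probing of candidate keys by a single pass over the input items
-- through an alias table keeping the lowest-rank non-empty value per canonical field
-- (objective: alternative); equivalence is about the returned dict only.

-- ===== PORT A =====
-- pick(*keys): first value that is not None/'', stripped; else ''  (dict values are str)
def pvPickA (d : PySem.Dict String String) (keys : List String) : String :=
  match keys with
  | [] => ""
  | k :: rest =>
    match d.get? k with
    | some v => if v = "" then pvPickA d rest else PySem.Str.strip v
    | none => pvPickA d rest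

def normalize_operation_filters (params : List (String × String)) : List (String × String) :=
  let d := PySem.Dict.ofList params   -- params = params or {}: [] already behaves as {}
  -- dict literal with distinct keys: PySem.Dict.mk of the pairs
  let normalized : PySem.Dict String String := PySem.Dict.mk [
    ("numero", pvPickA d ["numero", "filtro.numero"]),
    ("estado", let p := pvPickA d ["estado", "filtro.estado"]; if p = "" then "todas" else p),
    ("fecha_desde", pvPickA d ["fecha_desde", "fechaDesde", "filtro.fechaDesde"]),
    ("fecha_hasta", pvPickA d ["fecha_hasta", "fechaHasta", "filtro.fechaHasta"]),
    ("pais", let p := pvPickA d ["pais", "filtro.pais"]; if p = "" then "argentina" else p)]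
  let normalized :=
    if (normalized.getD "estado" "") ∈ (["todas", "terminada", "iniciada", "pendiente", "cancelada", "rechazada"] : List String)
    then normalized else normalized.insert "estado" "todas"
  let normalized :=
    if (normalized.getD "pais" "") ∈ (["argentina", "estados_Unidos"] : List String)
    then normalized else normalized.insert "pais" "argentina"
  normalized.items

-- ===== PORT B =====
-- ALIASES: incoming key -> (canonical field, rank)
def pvAliasD : PySem.Dict String (String × Nat) := PySem.Dict.mk [
  ("numero", ("numero", 0)), ("filtro.numero", ("numero", 1)),
  ("estado", ("estado", 0)), ("filtro.estado", ("estado", 1)),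
  ("fecha_desde", ("fecha_desde", 0)), ("fechaDesde", ("fecha_desde", 1)),
  ("filtro.fechaDesde", ("fecha_desde", 2)),
  ("fecha_hasta", ("fecha_hasta", 0)), ("fechaHasta", ("fecha_hasta", 1)),
  ("filtro.fechaHasta", ("fecha_hasta", 2)),
  ("pais", ("pais", 0)), ("filtro.pais", ("pais", 1))]

-- one step of B's first loop: fold an input item into 'best'
def pvStep (best : PySem.Dict String (Nat × String)) (kv : String × String) : PySem.Dict String (Nat × String) :=
  match pvAliasD.get? kv.1 with
  | none => best
  | some (field, rank) =>
    if kv.2 = "" then best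
    else
      match best.get? field with
      | none => best.insert field (rank, PySem.Str.strip kv.2)
      | some (r0, _) =>
        if rank < r0 then best.insert field (rank, PySem.Str.strip kv.2) else best

-- ALLOWED: field -> (allowed values, default)
def pvAllowedD : PySem.Dict String (List String × String) := PySem.Dict.mk [
  ("estado", (["todas", "terminada", "iniciada", "pendiente", "cancelada", "rechazada"], "todas")),
  ("pais", (["argentina", "estados_Unidos"], "argentina"))]

def normalize_operation_filters_alt (params : List (String × String)) : List (String × String) :=
  let d := PySem.Dict.ofList params
  let best := d.items.foldl pvStep PySem.Dict.empty
  let result := (["numero", "estado", "fecha_desde", "fecha_hasta", "pais"]).foldl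
    (fun res field =>
      let value := match best.get? field with | some rs => rs.2 | none => ""
      let value := match pvAllowedD.get? field with
        | some rule => if value ∈ rule.1 then value else rule.2
        | none => value
      res.insert field value) PySem.Dict.empty
  result.items

-- ===== PRECONDITION & SPEC =====
def Spec_normalize_operation_filters (params : List (String × String)) (out : List (String × String)) : Prop := out = normalize_operation_filters_alt params
instance (params : List (String × String)) (out : List (String × String)) : Decidable (Spec_normalize_operation_filters params out) := by unfold Spec_normalize_operation_filters; infer_instance

-- ===== CLAIM (what is proved, stated in full; the proofs are below) =====
def Claim_equal_normalize_operation_filters : Prop := ∀ (params : List (String × String)), Dom_normalize_operation_filters params → Spec_normalize_operation_filters params (normalize_operation_filters params)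

-- ===== LEMMAS AND PROOFS =====

-- first-match lookup in an association list (what Dict.get? computes on d.items when keys are Nodup)
def pvLGet (l : List (String × String)) (k : String) : Option String :=
  match l with
  | [] => none
  | (k', v) :: rest => if k' = k then some v else pvLGet rest k

-- left-biased minimum by rank
def pvMerge (a b : Option (Nat × String)) : Option (Nat × String) :=
  match a, b with
  | none, b => b
  | some a, none => some a
  | some a, some b => if b.1 < a.1 then some b else some a

-- the candidate one input item contributes to field f
def pvCandF (f : String) (kv : String × String) : Option (Nat × String) :=
  match pvAliasD.get? kv.1 with
  | none => none
  | some (g, r) => if kv.2 = "" then none else if g = f then some (r, PySem.Str.strip kv.2) else none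

-- the merged candidate of a whole item list for field f
def pvPM (f : String) (l : List (String × String)) : Option (Nat × String) :=
  match l with
  | [] => none
  | kv :: rest => pvMerge (pvCandF f kv) (pvPM f rest)

-- candidate spec: position of k in a candidate-key list, offset by off
def pvCandSpec (ks : List String) (off : Nat) (k : String) (v : String) : Option (Nat × String) :=
  match ks with
  | [] => none
  | k' :: rest =>
    if k = k' then (if v = "" then none else some (off, PySem.Str.strip v))
    else pvCandSpec rest (off + 1) k v

-- first-hit spec: what A's pick computes, with the winning rank recorded
def pvFH (l : List (String × String)) (off : Nat) (ks : List String) : Option (Nat × String) :=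
  match ks with
  | [] => none
  | k :: rest =>
    match pvLGet l k with
    | some v => if v = "" then pvFH l (off + 1) rest else some (off, PySem.Str.strip v)
    | none => pvFH l (off + 1) rest

theorem pvMerge_none_right (a : Option (Nat × String)) : pvMerge a none = a := by
  cases a <;> rfl

theorem pvMerge_assoc (a b c : Option (Nat × String)) :
    pvMerge (pvMerge a b) c = pvMerge a (pvMerge b c) := by
  cases a with
  | none => rfl
  | some a =>
    cases b with
    | none => cases c <;> rfl
    | some b =>
      cases c with
      | none => simp [pvMerge_none_right]
      | some c =>
        by_cases hba : b.1 < a.1 <;> by_cases hcb : c.1 < b.1 <;> by_cases hca : c.1 < a.1 <;>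
          simp [pvMerge, hba, hcb, hca] <;> first | rfl | (exfalso; omega) | omega

theorem pvStep_get (best : PySem.Dict String (Nat × String)) (kv : String × String) (f : String) :
    (pvStep best kv).get? f = pvMerge (best.get? f) (pvCandF f kv) := by
  unfold pvStep pvCandF
  cases pvAliasD.get? kv.1 with
  | none => simp [pvMerge_none_right]
  | some gr =>
    obtain ⟨g, r⟩ := gr
    by_cases hv : kv.2 = ""
    · simp [hv, pvMerge_none_right]
    · simp only [hv, if_false]
      by_cases hgf : g = f
      · subst hgf
        cases hbg : best.get? g with
        | none => simp [hbg, PySem.Dict.get?_insert_self, pvMerge]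
        | some rs =>
          by_cases hr : r < rs.1
          · simp [hbg, hr, PySem.Dict.get?_insert_self, pvMerge]
          · simp [hbg, hr, pvMerge]
      · have hfg : f ≠ g := fun h => hgf h.symm
        cases hbg : best.get? g with
        | none => simp [hbg, hgf, PySem.Dict.get?_insert_of_ne _ _ hfg, pvMerge_none_right]
        | some rs =>
          by_cases hr : r < rs.1 <;>
            simp [hbg, hgf, hr, PySem.Dict.get?_insert_of_ne _ _ hfg, pvMerge_none_right]

theorem pvFoldl_step_get (l : List (String × String)) (b : PySem.Dict String (Nat × String)) (f : String) :
    (l.foldl pvStep b).get? f = pvMerge (b.get? f) (pvPM f l) := by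
  induction l generalizing b with
  | nil => simp [pvPM, pvMerge_none_right]
  | cons kv rest ih => simp [List.foldl_cons, ih, pvStep_get, pvPM, pvMerge_assoc]

theorem pvLGet_none_of_not_mem (l : List (String × String)) (k : String)
    (h : k ∉ l.map Prod.fst) : pvLGet l k = none := by
  induction l with
  | nil => rfl
  | cons kv rest ih =>
    obtain ⟨k', v⟩ := kv
    simp only [List.map_cons, List.mem_cons, not_or] at h
    have hne : k' ≠ k := fun he => h.1 he.symm
    simp [pvLGet, hne, ih h.2]

theorem pvLGet_not_mem_of_none (l : List (String × String)) (k : String)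
    (h : pvLGet l k = none) : k ∉ l.map Prod.fst := by
  induction l with
  | nil => simp
  | cons kv rest ih =>
    obtain ⟨k', v⟩ := kv
    simp only [pvLGet] at h
    by_cases hk : k' = k
    · simp [hk] at h
    · simp only [hk, if_false] at h
      simp only [List.map_cons, List.mem_cons, not_or]
      exact ⟨fun he => hk he.symm, ih h⟩

theorem pvLGet_mem (l : List (String × String)) (k v : String)
    (h : pvLGet l k = some v) : (k, v) ∈ l := by
  induction l with
  | nil => simp [pvLGet] at h
  | cons kv rest ih =>
    obtain ⟨k', v'⟩ := kv
    simp only [pvLGet] at h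
    by_cases hk : k' = k
    · subst hk
      simp at h
      subst h
      exact List.mem_cons_self
    · simp only [hk, if_false] at h
      exact List.mem_cons_of_mem _ (ih h)

theorem pvCandSpec_rank_ge (ks : List String) (off : Nat) (k v : String) (r : Nat) (s : String)
    (h : pvCandSpec ks off k v = some (r, s)) : off ≤ r := by
  induction ks generalizing off with
  | nil => simp [pvCandSpec] at h
  | cons k' rest ih =>
    simp only [pvCandSpec] at h
    split_ifs at h with h1 h2
    · simp at h; omega
    · exact Nat.le_of_succ_le (ih (off + 1) h)

theorem pvFH_nil (ks : List String) (off : Nat) : pvFH [] off ks = none := by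
  induction ks generalizing off with
  | nil => rfl
  | cons k rest ih => simp [pvFH, pvLGet, ih]

theorem pvFH_rank_ge (l : List (String × String)) (ks : List String) (off : Nat) (r : Nat) (s : String)
    (h : pvFH l off ks = some (r, s)) : off ≤ r := by
  induction ks generalizing off with
  | nil => simp [pvFH] at h
  | cons k rest ih =>
    cases hg : pvLGet l k with
    | none =>
      simp only [pvFH, hg] at h
      exact Nat.le_of_succ_le (ih (off + 1) h)
    | some v =>
      simp only [pvFH, hg] at h
      split_ifs at h with hv
      · exact Nat.le_of_succ_le (ih (off + 1) h)
      · simp at h; omega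

-- a cons whose value is '' and whose key is absent from l changes no first-hit
theorem pvFH_cons_empty (l : List (String × String)) (k : String) (ks : List String) (off : Nat)
    (hk : pvLGet l k = none) : pvFH ((k, "") :: l) off ks = pvFH l off ks := by
  induction ks generalizing off with
  | nil => rfl
  | cons k' rest ih =>
    simp only [pvFH, pvLGet]
    by_cases hkk : k = k'
    · subst hkk; simp [hk, ih]
    · simp [hkk, ih]

-- the key step: merging one item's candidate into the tail's first-hit gives the cons's first-hit
theorem pvMerge_candSpec_fh (ks : List String) (off : Nat) (k v : String) (l : List (String × String))
    (hk : pvLGet l k = none) :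
    pvMerge (pvCandSpec ks off k v) (pvFH l off ks) = pvFH ((k, v) :: l) off ks := by
  induction ks generalizing off with
  | nil => simp [pvCandSpec, pvFH, pvMerge]
  | cons k' rest ih =>
    by_cases hkk : k = k'
    · subst hkk
      by_cases hv : v = ""
      · subst hv
        simp only [pvCandSpec, pvFH, pvLGet, if_pos rfl, hk, pvMerge]
        exact (pvFH_cons_empty l k rest (off + 1) hk).symm
      · simp only [pvCandSpec, pvFH, pvLGet, if_pos rfl, hv, if_false, hk]
        cases hfh : pvFH l (off + 1) rest with
        | none => simp [pvMerge, hv]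
        | some rs =>
          obtain ⟨r, s⟩ := rs
          have hge := pvFH_rank_ge l rest (off + 1) r s hfh
          simp [pvMerge, hv, show ¬ r < off by omega]
    · have hkk' : k' ≠ k := fun h => hkk h.symm
      cases hg : pvLGet l k' with
      | none =>
        simp only [pvCandSpec, pvFH, pvLGet, hkk, if_false, hkk', hg]
        exact ih (off + 1)
      | some v' =>
        by_cases hv' : v' = ""
        · subst hv'
          simp only [pvCandSpec, pvFH, pvLGet, hkk, if_false, hkk', hg, if_pos rfl]
          exact ih (off + 1)
        · simp only [pvCandSpec, pvFH, pvLGet, hkk, if_false, hkk', hg, hv']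
          cases hcs : pvCandSpec rest (off + 1) k v with
          | none => simp [pvMerge]
          | some rs =>
            obtain ⟨r, s⟩ := rs
            have hge := pvCandSpec_rank_ge rest (off + 1) k v r s hcs
            simp [pvMerge, show off < r by omega]

theorem pvPM_eq_fh (f : String) (ks : List String)
    (Hc : ∀ k v, pvCandF f (k, v) = pvCandSpec ks 0 k v)
    (l : List (String × String)) (hnd : (l.map Prod.fst).Nodup) :
    pvPM f l = pvFH l 0 ks := by
  induction l with
  | nil => exact (pvFH_nil ks 0).symm
  | cons kv rest ih =>
    obtain ⟨k, v⟩ := kv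
    simp only [List.map_cons, List.nodup_cons] at hnd
    have hk : pvLGet rest k = none := pvLGet_none_of_not_mem rest k hnd.1
    rw [pvPM, Hc, ih hnd.2, pvMerge_candSpec_fh ks 0 k v rest hk]

-- Dict.get? agrees with first-match lookup on items when keys are Nodup
theorem pvLGet_items (d : PySem.Dict String String) (hnd : d.keys.Nodup) (k : String) :
    pvLGet d.items k = d.get? k := by
  cases hres : pvLGet d.items k with
  | none =>
    have hmem : k ∉ d.keys := by
      have := pvLGet_not_mem_of_none d.items k hres
      intro hm; apply this
      simpa [PySem.Dict.keys] using hm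
    exact ((PySem.Dict.get?_eq_none_iff_not_mem_keys d k).mpr hmem).symm
  | some v =>
    exact (PySem.Dict.get?_of_mem_items d (pvLGet_mem d.items k v hres) hnd).symm

-- the value A's pick returns is the value of the first-hit
theorem pvFH_val (d : PySem.Dict String String) (hnd : d.keys.Nodup) (ks : List String) (off : Nat) :
    (match pvFH d.items off ks with | some rs => rs.2 | none => "") = pvPickA d ks := by
  induction ks generalizing off with
  | nil => rfl
  | cons k rest ih =>
    simp only [pvFH, pvPickA, pvLGet_items d hnd]
    cases d.get? k with
    | none => exact ih (off + 1)
    | some v =>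
      by_cases hv : v = "" <;> simp [hv, ih (off + 1)]

theorem pvHc_numero : ∀ k v, pvCandF "numero" (k, v) = pvCandSpec ["numero", "filtro.numero"] 0 k v := by
  intro k v
  by_cases hv : v = ""
  · subst hv
    rcases h : pvAliasD.get? k with _ | ⟨g, r⟩ <;> simp [pvCandF, pvCandSpec, h]
  by_cases h1 : k = "numero"
  · subst h1; simp [pvCandF, pvCandSpec, pvAliasD, PySem.Dict.get?_mk_cons, hv]
  by_cases h2 : k = "filtro.numero"
  · subst h2; simp [pvCandF, pvCandSpec, pvAliasD, PySem.Dict.get?_mk_cons, hv]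
  by_cases h3 : k = "estado"
  · subst h3; simp [pvCandF, pvCandSpec, pvAliasD, PySem.Dict.get?_mk_cons, hv]
  by_cases h4 : k = "filtro.estado"
  · subst h4; simp [pvCandF, pvCandSpec, pvAliasD, PySem.Dict.get?_mk_cons, hv]
  by_cases h5 : k = "fecha_desde"
  · subst h5; simp [pvCandF, pvCandSpec, pvAliasD, PySem.Dict.get?_mk_cons, hv]
  by_cases h6 : k = "fechaDesde"
  · subst h6; simp [pvCandF, pvCandSpec, pvAliasD, PySem.Dict.get?_mk_cons, hv]
  by_cases h7 : k = "filtro.fechaDesde"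
  · subst h7; simp [pvCandF, pvCandSpec, pvAliasD, PySem.Dict.get?_mk_cons, hv]
  by_cases h8 : k = "fecha_hasta"
  · subst h8; simp [pvCandF, pvCandSpec, pvAliasD, PySem.Dict.get?_mk_cons, hv]
  by_cases h9 : k = "fechaHasta"
  · subst h9; simp [pvCandF, pvCandSpec, pvAliasD, PySem.Dict.get?_mk_cons, hv]
  by_cases h10 : k = "filtro.fechaHasta"
  · subst h10; simp [pvCandF, pvCandSpec, pvAliasD, PySem.Dict.get?_mk_cons, hv]
  by_cases h11 : k = "pais"
  · subst h11; simp [pvCandF, pvCandSpec, pvAliasD, PySem.Dict.get?_mk_cons, hv]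
  by_cases h12 : k = "filtro.pais"
  · subst h12; simp [pvCandF, pvCandSpec, pvAliasD, PySem.Dict.get?_mk_cons, hv]
  simp [pvCandF, pvCandSpec, pvAliasD, PySem.Dict.get?, PySem.Dict.get?_mk_cons, hv, h1, h2, h3, h4, h5, h6, h7, h8, h9, h10, h11, h12, Ne.symm h1, Ne.symm h2, Ne.symm h3, Ne.symm h4, Ne.symm h5, Ne.symm h6, Ne.symm h7, Ne.symm h8, Ne.symm h9, Ne.symm h10, Ne.symm h11, Ne.symm h12]

theorem pvHc_estado : ∀ k v, pvCandF "estado" (k, v) = pvCandSpec ["estado", "filtro.estado"] 0 k v := by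
  intro k v
  by_cases hv : v = ""
  · subst hv
    rcases h : pvAliasD.get? k with _ | ⟨g, r⟩ <;> simp [pvCandF, pvCandSpec, h]
  by_cases h1 : k = "numero"
  · subst h1; simp [pvCandF, pvCandSpec, pvAliasD, PySem.Dict.get?_mk_cons, hv]
  by_cases h2 : k = "filtro.numero"
  · subst h2; simp [pvCandF, pvCandSpec, pvAliasD, PySem.Dict.get?_mk_cons, hv]
  by_cases h3 : k = "estado"
  · subst h3; simp [pvCandF, pvCandSpec, pvAliasD, PySem.Dict.get?_mk_cons, hv]
  by_cases h4 : k = "filtro.estado"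
  · subst h4; simp [pvCandF, pvCandSpec, pvAliasD, PySem.Dict.get?_mk_cons, hv]
  by_cases h5 : k = "fecha_desde"
  · subst h5; simp [pvCandF, pvCandSpec, pvAliasD, PySem.Dict.get?_mk_cons, hv]
  by_cases h6 : k = "fechaDesde"
  · subst h6; simp [pvCandF, pvCandSpec, pvAliasD, PySem.Dict.get?_mk_cons, hv]
  by_cases h7 : k = "filtro.fechaDesde"
  · subst h7; simp [pvCandF, pvCandSpec, pvAliasD, PySem.Dict.get?_mk_cons, hv]
  by_cases h8 : k = "fecha_hasta"
  · subst h8; simp [pvCandF, pvCandSpec, pvAliasD, PySem.Dict.get?_mk_cons, hv]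
  by_cases h9 : k = "fechaHasta"
  · subst h9; simp [pvCandF, pvCandSpec, pvAliasD, PySem.Dict.get?_mk_cons, hv]
  by_cases h10 : k = "filtro.fechaHasta"
  · subst h10; simp [pvCandF, pvCandSpec, pvAliasD, PySem.Dict.get?_mk_cons, hv]
  by_cases h11 : k = "pais"
  · subst h11; simp [pvCandF, pvCandSpec, pvAliasD, PySem.Dict.get?_mk_cons, hv]
  by_cases h12 : k = "filtro.pais"
  · subst h12; simp [pvCandF, pvCandSpec, pvAliasD, PySem.Dict.get?_mk_cons, hv]
  simp [pvCandF, pvCandSpec, pvAliasD, PySem.Dict.get?, PySem.Dict.get?_mk_cons, hv, h1, h2, h3, h4, h5, h6, h7, h8, h9, h10, h11, h12, Ne.symm h1, Ne.symm h2, Ne.symm h3, Ne.symm h4, Ne.symm h5, Ne.symm h6, Ne.symm h7, Ne.symm h8, Ne.symm h9, Ne.symm h10, Ne.symm h11, Ne.symm h12]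

theorem pvHc_fecha_desde : ∀ k v, pvCandF "fecha_desde" (k, v) = pvCandSpec ["fecha_desde", "fechaDesde", "filtro.fechaDesde"] 0 k v := by
  intro k v
  by_cases hv : v = ""
  · subst hv
    rcases h : pvAliasD.get? k with _ | ⟨g, r⟩ <;> simp [pvCandF, pvCandSpec, h]
  by_cases h1 : k = "numero"
  · subst h1; simp [pvCandF, pvCandSpec, pvAliasD, PySem.Dict.get?_mk_cons, hv]
  by_cases h2 : k = "filtro.numero"
  · subst h2; simp [pvCandF, pvCandSpec, pvAliasD, PySem.Dict.get?_mk_cons, hv]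
  by_cases h3 : k = "estado"
  · subst h3; simp [pvCandF, pvCandSpec, pvAliasD, PySem.Dict.get?_mk_cons, hv]
  by_cases h4 : k = "filtro.estado"
  · subst h4; simp [pvCandF, pvCandSpec, pvAliasD, PySem.Dict.get?_mk_cons, hv]
  by_cases h5 : k = "fecha_desde"
  · subst h5; simp [pvCandF, pvCandSpec, pvAliasD, PySem.Dict.get?_mk_cons, hv]
  by_cases h6 : k = "fechaDesde"
  · subst h6; simp [pvCandF, pvCandSpec, pvAliasD, PySem.Dict.get?_mk_cons, hv]
  by_cases h7 : k = "filtro.fechaDesde"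
  · subst h7; simp [pvCandF, pvCandSpec, pvAliasD, PySem.Dict.get?_mk_cons, hv]
  by_cases h8 : k = "fecha_hasta"
  · subst h8; simp [pvCandF, pvCandSpec, pvAliasD, PySem.Dict.get?_mk_cons, hv]
  by_cases h9 : k = "fechaHasta"
  · subst h9; simp [pvCandF, pvCandSpec, pvAliasD, PySem.Dict.get?_mk_cons, hv]
  by_cases h10 : k = "filtro.fechaHasta"
  · subst h10; simp [pvCandF, pvCandSpec, pvAliasD, PySem.Dict.get?_mk_cons, hv]
  by_cases h11 : k = "pais"
  · subst h11; simp [pvCandF, pvCandSpec, pvAliasD, PySem.Dict.get?_mk_cons, hv]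
  by_cases h12 : k = "filtro.pais"
  · subst h12; simp [pvCandF, pvCandSpec, pvAliasD, PySem.Dict.get?_mk_cons, hv]
  simp [pvCandF, pvCandSpec, pvAliasD, PySem.Dict.get?, PySem.Dict.get?_mk_cons, hv, h1, h2, h3, h4, h5, h6, h7, h8, h9, h10, h11, h12, Ne.symm h1, Ne.symm h2, Ne.symm h3, Ne.symm h4, Ne.symm h5, Ne.symm h6, Ne.symm h7, Ne.symm h8, Ne.symm h9, Ne.symm h10, Ne.symm h11, Ne.symm h12]

theorem pvHc_fecha_hasta : ∀ k v, pvCandF "fecha_hasta" (k, v) = pvCandSpec ["fecha_hasta", "fechaHasta", "filtro.fechaHasta"] 0 k v := by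
  intro k v
  by_cases hv : v = ""
  · subst hv
    rcases h : pvAliasD.get? k with _ | ⟨g, r⟩ <;> simp [pvCandF, pvCandSpec, h]
  by_cases h1 : k = "numero"
  · subst h1; simp [pvCandF, pvCandSpec, pvAliasD, PySem.Dict.get?_mk_cons, hv]
  by_cases h2 : k = "filtro.numero"
  · subst h2; simp [pvCandF, pvCandSpec, pvAliasD, PySem.Dict.get?_mk_cons, hv]
  by_cases h3 : k = "estado"
  · subst h3; simp [pvCandF, pvCandSpec, pvAliasD, PySem.Dict.get?_mk_cons, hv]
  by_cases h4 : k = "filtro.estado"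
  · subst h4; simp [pvCandF, pvCandSpec, pvAliasD, PySem.Dict.get?_mk_cons, hv]
  by_cases h5 : k = "fecha_desde"
  · subst h5; simp [pvCandF, pvCandSpec, pvAliasD, PySem.Dict.get?_mk_cons, hv]
  by_cases h6 : k = "fechaDesde"
  · subst h6; simp [pvCandF, pvCandSpec, pvAliasD, PySem.Dict.get?_mk_cons, hv]
  by_cases h7 : k = "filtro.fechaDesde"
  · subst h7; simp [pvCandF, pvCandSpec, pvAliasD, PySem.Dict.get?_mk_cons, hv]
  by_cases h8 : k = "fecha_hasta"
  · subst h8; simp [pvCandF, pvCandSpec, pvAliasD, PySem.Dict.get?_mk_cons, hv]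
  by_cases h9 : k = "fechaHasta"
  · subst h9; simp [pvCandF, pvCandSpec, pvAliasD, PySem.Dict.get?_mk_cons, hv]
  by_cases h10 : k = "filtro.fechaHasta"
  · subst h10; simp [pvCandF, pvCandSpec, pvAliasD, PySem.Dict.get?_mk_cons, hv]
  by_cases h11 : k = "pais"
  · subst h11; simp [pvCandF, pvCandSpec, pvAliasD, PySem.Dict.get?_mk_cons, hv]
  by_cases h12 : k = "filtro.pais"
  · subst h12; simp [pvCandF, pvCandSpec, pvAliasD, PySem.Dict.get?_mk_cons, hv]
  simp [pvCandF, pvCandSpec, pvAliasD, PySem.Dict.get?, PySem.Dict.get?_mk_cons, hv, h1, h2, h3, h4, h5, h6, h7, h8, h9, h10, h11, h12, Ne.symm h1, Ne.symm h2, Ne.symm h3, Ne.symm h4, Ne.symm h5, Ne.symm h6, Ne.symm h7, Ne.symm h8, Ne.symm h9, Ne.symm h10, Ne.symm h11, Ne.symm h12]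

theorem pvHc_pais : ∀ k v, pvCandF "pais" (k, v) = pvCandSpec ["pais", "filtro.pais"] 0 k v := by
  intro k v
  by_cases hv : v = ""
  · subst hv
    rcases h : pvAliasD.get? k with _ | ⟨g, r⟩ <;> simp [pvCandF, pvCandSpec, h]
  by_cases h1 : k = "numero"
  · subst h1; simp [pvCandF, pvCandSpec, pvAliasD, PySem.Dict.get?_mk_cons, hv]
  by_cases h2 : k = "filtro.numero"
  · subst h2; simp [pvCandF, pvCandSpec, pvAliasD, PySem.Dict.get?_mk_cons, hv]
  by_cases h3 : k = "estado"
  · subst h3; simp [pvCandF, pvCandSpec, pvAliasD, PySem.Dict.get?_mk_cons, hv]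
  by_cases h4 : k = "filtro.estado"
  · subst h4; simp [pvCandF, pvCandSpec, pvAliasD, PySem.Dict.get?_mk_cons, hv]
  by_cases h5 : k = "fecha_desde"
  · subst h5; simp [pvCandF, pvCandSpec, pvAliasD, PySem.Dict.get?_mk_cons, hv]
  by_cases h6 : k = "fechaDesde"
  · subst h6; simp [pvCandF, pvCandSpec, pvAliasD, PySem.Dict.get?_mk_cons, hv]
  by_cases h7 : k = "filtro.fechaDesde"
  · subst h7; simp [pvCandF, pvCandSpec, pvAliasD, PySem.Dict.get?_mk_cons, hv]
  by_cases h8 : k = "fecha_hasta"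
  · subst h8; simp [pvCandF, pvCandSpec, pvAliasD, PySem.Dict.get?_mk_cons, hv]
  by_cases h9 : k = "fechaHasta"
  · subst h9; simp [pvCandF, pvCandSpec, pvAliasD, PySem.Dict.get?_mk_cons, hv]
  by_cases h10 : k = "filtro.fechaHasta"
  · subst h10; simp [pvCandF, pvCandSpec, pvAliasD, PySem.Dict.get?_mk_cons, hv]
  by_cases h11 : k = "pais"
  · subst h11; simp [pvCandF, pvCandSpec, pvAliasD, PySem.Dict.get?_mk_cons, hv]
  by_cases h12 : k = "filtro.pais"
  · subst h12; simp [pvCandF, pvCandSpec, pvAliasD, PySem.Dict.get?_mk_cons, hv]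
  simp [pvCandF, pvCandSpec, pvAliasD, PySem.Dict.get?, PySem.Dict.get?_mk_cons, hv, h1, h2, h3, h4, h5, h6, h7, h8, h9, h10, h11, h12, Ne.symm h1, Ne.symm h2, Ne.symm h3, Ne.symm h4, Ne.symm h5, Ne.symm h6, Ne.symm h7, Ne.symm h8, Ne.symm h9, Ne.symm h10, Ne.symm h11, Ne.symm h12]

-- the value B keeps for a field equals what A's pick computes
theorem pvBest_val (params : List (String × String)) (f : String) (ks : List String)
    (Hc : ∀ k v, pvCandF f (k, v) = pvCandSpec ks 0 k v) :
    (match ((PySem.Dict.ofList params).items.foldl pvStep PySem.Dict.empty).get? f with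
      | some rs => rs.2 | none => "") = pvPickA (PySem.Dict.ofList params) ks := by
  have hnd : (PySem.Dict.ofList params).keys.Nodup := PySem.Dict.nodup_keys_ofList params
  have hndm : ((PySem.Dict.ofList params).items.map Prod.fst).Nodup := by
    simpa [PySem.Dict.keys] using hnd
  rw [pvFoldl_step_get, PySem.Dict.get?_empty,
    pvPM_eq_fh f ks Hc (PySem.Dict.ofList params).items hndm]
  exact pvFH_val (PySem.Dict.ofList params) hnd ks 0

-- ===== VERDICT (by name: the statement is the Claim_ definition above) =====
set_option maxHeartbeats 1000000 in
theorem normalize_operation_filters_spec : Claim_equal_normalize_operation_filters := by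
  intro params _
  unfold Spec_normalize_operation_filters
  simp only [normalize_operation_filters, normalize_operation_filters_alt]
  rw [PySem.Dict.items_foldl_insert_fresh _ (fun a => a) _ _ (by intro a _; rfl) (by decide)]
  simp only [List.map_cons, List.map_nil]
  rw [pvBest_val params _ _ pvHc_numero, pvBest_val params _ _ pvHc_estado,
      pvBest_val params _ _ pvHc_fecha_desde, pvBest_val params _ _ pvHc_fecha_hasta,
      pvBest_val params _ _ pvHc_pais]
  set d := PySem.Dict.ofList params with hd
  generalize pvPickA d ["numero", "filtro.numero"] = p1
  generalize pvPickA d ["estado", "filtro.estado"] = p2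
  generalize pvPickA d ["fecha_desde", "fechaDesde", "filtro.fechaDesde"] = p3
  generalize pvPickA d ["fecha_hasta", "fechaHasta", "filtro.fechaHasta"] = p4
  generalize pvPickA d ["pais", "filtro.pais"] = p5
  by_cases h2 : p2 = "" <;> by_cases h5 : p5 = "" <;>
    simp [h2, h5, pvAllowedD, PySem.Dict.get?_mk_cons, PySem.Dict.insert, PySem.Dict.getD,
      PySem.Dict.get?, PySem.Dict.contains, PySem.Dict.items, PySem.Dict.empty] <;>
    split_ifs <;> simp_all
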